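-- pv_equiv track=rewrite | github.com/key-moon/golf | tools/search_mapping_v2.py | _gen_neg_literals_len
-- ===== SOURCE A (Python) =====
-- MAX_LITERAL_BYTES = 3  # do not generate integer literals of length >= 5
--
-- _FIRST_NONZERO = "123456789"
--
-- def _gen_neg_literals_len(L):
--     if L <= 1 or L > MAX_LITERAL_BYTES:
--         return
--     if L == 2:
--         for d in _FIRST_NONZERO:
--             yield "-" + d
--         return
--     for i in range(10**(L-2), 10**(L-1)):
--         yield str(-i)
-- ===== SOURCE B (Python) =====
-- MAX_LITERAL_BYTES = 3
--
-- _FIRST_NONZERO = "123456789"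
--
-- def _suffixes(k):
--     if k == 0:
--         yield ""
--     else:
--         for d in "0123456789":
--             for s in _suffixes(k - 1):
--                 yield d + s
--
-- def _gen_neg_literals_len(L):
--     if L <= 1 or L > MAX_LITERAL_BYTES:
--         return
--     for first in _FIRST_NONZERO:
--         for s in _suffixes(L - 2):
--             yield "-" + first + s
-- ===== Notes on version B (the rewrite author's own statement) =====
-- stated objective: alternative
-- what changed: B builds each literal from digit characters (first digit from _FIRST_NONZERO, remaining positions from a lexicographic digit-suffix enumeration) instead of converting integers from a numeric range to strings, which also removes A's special branch for the shortest length.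
import Mathlib
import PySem

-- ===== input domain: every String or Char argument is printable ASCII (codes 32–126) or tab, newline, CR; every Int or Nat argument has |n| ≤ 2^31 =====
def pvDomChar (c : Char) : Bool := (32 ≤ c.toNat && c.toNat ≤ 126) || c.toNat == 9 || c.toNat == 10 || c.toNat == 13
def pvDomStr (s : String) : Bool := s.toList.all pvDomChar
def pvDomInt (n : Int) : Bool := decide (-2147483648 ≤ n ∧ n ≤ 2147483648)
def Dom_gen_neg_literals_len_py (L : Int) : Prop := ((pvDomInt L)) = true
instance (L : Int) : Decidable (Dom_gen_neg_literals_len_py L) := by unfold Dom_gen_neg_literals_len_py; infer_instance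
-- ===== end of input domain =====

-- B enumerates digit characters (nested lexicographic loops) instead of A's numeric range + str();
-- same values in the same order, no L==2 special case.  Objective: alternative (same cost).

-- ===== PORT A =====
def pvMaxLiteralBytes : Int := 3

def pvFirstNonzero : String := "123456789"

def gen_neg_literals_len_py (L : Int) : List String :=
  if L ≤ 1 ∨ L > pvMaxLiteralBytes then []
  else if L = 2 then
    pvFirstNonzero.toList.map (fun d => "-" ++ String.ofList [d])
  else
    (PySem.List.pyRange ((10:Int) ^ (L - 2).toNat) ((10:Int) ^ (L - 1).toNat) 1).map
      (fun i => PySem.Int.toStr (-i))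

-- ===== PORT B =====
-- suffixes of k digit characters, lexicographic (leftmost varies slowest), as in Source B's _suffixes
def pvSuffixes : Nat → List String
  | 0 => [""]
  | k + 1 => "0123456789".toList.flatMap (fun d => (pvSuffixes k).map (fun s => String.ofList [d] ++ s))

def gen_neg_literals_len_py_alt (L : Int) : List String :=
  if L ≤ 1 ∨ L > pvMaxLiteralBytes then []
  else
    pvFirstNonzero.toList.flatMap (fun f => (pvSuffixes (L - 2).toNat).map (fun s => "-" ++ String.ofList [f] ++ s))

-- ===== PRECONDITION & SPEC =====
def Spec_gen_neg_literals_len_py (L : Int) (out : List String) : Prop := out = gen_neg_literals_len_py_alt L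
instance (L : Int) (out : List String) : Decidable (Spec_gen_neg_literals_len_py L out) := by unfold Spec_gen_neg_literals_len_py; infer_instance

-- ===== CLAIM (what is proved, stated in full; the proofs are below) =====
def Claim_equal_gen_neg_literals_len_py : Prop := ∀ (L : Int), Dom_gen_neg_literals_len_py L → Spec_gen_neg_literals_len_py L (gen_neg_literals_len_py L)

-- ===== LEMMAS AND PROOFS =====

-- ===== VERDICT (by name: the statement is the Claim_ definition above) =====
theorem gen_neg_literals_len_py_spec : Claim_equal_gen_neg_literals_len_py := by
  intro L _
  unfold Spec_gen_neg_literals_len_py gen_neg_literals_len_py gen_neg_literals_len_py_alt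
  by_cases h : L ≤ 1 ∨ L > pvMaxLiteralBytes
  · simp [h]
  · have h23 : L = 2 ∨ L = 3 := by
      unfold pvMaxLiteralBytes at h; omega
    rcases h23 with rfl | rfl
    · simp only [h, if_false]
      decide
    · simp only [h, if_false]
      decide
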